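-- pv_equiv track=rewrite | github.com/nish542/AutoList | backend/app/generators/listing_generator.py | _generate_technology_bullet
-- ===== SOURCE A (Python) =====
-- from typing import Dict, Any, List, Set, Tuple
--
-- def _generate_technology_bullet(attributes: Dict, features: Dict, schema: Dict, used_keywords: Set[str]) -> str:
--     """
--     Generate bullet focusing on technology features
--     """
--     smart = any(word in str(attributes).lower() for word in ["smart", "ai", "intelligent"])
--     wireless = "wireless" in str(attributes).lower() or "bluetooth" in str(attributes).lower()
--     charging = any(word in str(attributes).lower() for word in ["charging", "rechargeable", "usb"])
--
--     if smart and "smart" not in str(used_keywords):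
--         return "Intelligent technology adapts to usage patterns for personalized optimization"
--     elif wireless and "wireless" not in str(used_keywords):
--         return "Wireless connectivity eliminates cable constraints while maintaining stable connection"
--     elif charging and "charging" not in str(used_keywords):
--         return "Rapid charging technology minimizes downtime with efficient power management"
--     else:
--         return None
-- ===== SOURCE B (Python) =====
-- _WORD_CATEGORY = [
--     ("smart", "smart"), ("ai", "smart"), ("intelligent", "smart"),
--     ("wireless", "wireless"), ("bluetooth", "wireless"),
--     ("charging", "charging"), ("rechargeable", "charging"), ("usb", "charging"),
-- ]
--
-- _MESSAGES = {
--     "smart": "Intelligent technology adapts to usage patterns for personalized optimization",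
--     "wireless": "Wireless connectivity eliminates cable constraints while maintaining stable connection",
--     "charging": "Rapid charging technology minimizes downtime with efficient power management",
-- }
--
--
-- def _generate_technology_bullet(attributes, features, schema, used_keywords):
--     attr = str(attributes).lower()
--     # One left-to-right scan over the attribute text: at each position, record the
--     # category of every trigger word that starts there (naive multi-pattern matching),
--     # instead of running an independent substring search per keyword.
--     found = set()
--     for j in range(len(attr) + 1):
--         for word, category in _WORD_CATEGORY:
--             if attr.startswith(word, j):
--                 found.add(category)
--     used = str(used_keywords)
--     for category in ("smart", "wireless", "charging"):
--         if category in found and category not in used: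
--             return _MESSAGES[category]
--     return None
-- ===== Notes on version B (the rewrite author's own statement) =====
-- stated objective: alternative
-- what changed: A runs eight independent substring searches ('word in attr') and selects with an if/elif chain; B detects all trigger categories in one left-to-right scan over the attribute text (at each position it records the category of every trigger word starting there, a naive multi-pattern matcher accumulating a set), then picks the first detected, unused category.
import Mathlib
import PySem

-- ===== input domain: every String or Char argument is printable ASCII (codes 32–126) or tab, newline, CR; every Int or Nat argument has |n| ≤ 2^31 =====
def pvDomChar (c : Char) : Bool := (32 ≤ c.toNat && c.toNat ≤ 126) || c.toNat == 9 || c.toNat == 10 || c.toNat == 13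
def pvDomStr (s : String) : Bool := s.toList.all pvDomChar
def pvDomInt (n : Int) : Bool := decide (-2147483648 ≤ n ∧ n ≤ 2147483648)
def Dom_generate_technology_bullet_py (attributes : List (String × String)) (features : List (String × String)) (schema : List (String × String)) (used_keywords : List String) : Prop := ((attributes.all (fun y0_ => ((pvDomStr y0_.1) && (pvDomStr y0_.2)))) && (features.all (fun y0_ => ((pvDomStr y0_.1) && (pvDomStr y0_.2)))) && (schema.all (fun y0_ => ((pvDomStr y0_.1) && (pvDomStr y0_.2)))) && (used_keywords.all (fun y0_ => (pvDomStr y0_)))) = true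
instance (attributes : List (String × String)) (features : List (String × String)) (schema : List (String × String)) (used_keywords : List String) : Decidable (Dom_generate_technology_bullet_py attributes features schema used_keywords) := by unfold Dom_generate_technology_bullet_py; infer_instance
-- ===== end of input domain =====

-- B replaces A's eight independent substring searches and elif chain by one
-- left-to-right positional scan of the attribute text that accumulates the set of
-- detected categories, followed by a first-match pick over the categories (objective: alternative).


-- ===== PORT A =====
-- Python's repr of a str, hand-ported (exact for the Dom character set: printable
-- ASCII plus tab/newline/CR, which repr escapes as \t \n \r; quote choice as CPython).
def pyReprStr (s : String) : String :=
  let cs := s.toList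
  let q : Char := if cs.contains '\'' && !(cs.contains '"') then '"' else '\''
  String.ofList (q :: (cs.flatMap (fun c =>
    if c = '\\' then ['\\', '\\']
    else if c = q then ['\\', q]
    else if c = Char.ofNat 9 then ['\\', 't']
    else if c = Char.ofNat 10 then ['\\', 'n']
    else if c = Char.ofNat 13 then ['\\', 'r']
    else [c])) ++ [q])

-- str(d) for a dict of strings, hand-ported ("{}" / "{'k': 'v', …}").
def pyReprDict (d : List (String × String)) : String :=
  if d = [] then "{}"
  else "{" ++ PySem.Str.join ", " (d.map (fun kv => pyReprStr kv.1 ++ ": " ++ pyReprStr kv.2)) ++ "}"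

-- str(s) for a set of strings, hand-ported ("set()" / "{'a', …}"); the port joins in
-- list order while CPython's set order is hash-dependent, which cannot change any of the
-- all-letter substring tests the programs make of this string (elements are quoted).
def pyReprSet (s : List String) : String :=
  if s = [] then "set()"
  else "{" ++ PySem.Str.join ", " (s.map pyReprStr) ++ "}"

def generate_technology_bullet_py (attributes : List (String × String)) (features : List (String × String)) (schema : List (String × String)) (used_keywords : List String) : Option String :=
  let smart := ["smart", "ai", "intelligent"].any (fun w => PySem.Str.isIn w (PySem.Str.lower (pyReprDict attributes)))
  let wireless := PySem.Str.isIn "wireless" (PySem.Str.lower (pyReprDict attributes)) || PySem.Str.isIn "bluetooth" (PySem.Str.lower (pyReprDict attributes))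
  let charging := ["charging", "rechargeable", "usb"].any (fun w => PySem.Str.isIn w (PySem.Str.lower (pyReprDict attributes)))
  if smart && !(PySem.Str.isIn "smart" (pyReprSet used_keywords)) then
    some "Intelligent technology adapts to usage patterns for personalized optimization"
  else if wireless && !(PySem.Str.isIn "wireless" (pyReprSet used_keywords)) then
    some "Wireless connectivity eliminates cable constraints while maintaining stable connection"
  else if charging && !(PySem.Str.isIn "charging" (pyReprSet used_keywords)) then
    some "Rapid charging technology minimizes downtime with efficient power management"
  else none

-- ===== PORT B =====
def pvWordCategory : List (String × String) :=
  [("smart", "smart"), ("ai", "smart"), ("intelligent", "smart"),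
   ("wireless", "wireless"), ("bluetooth", "wireless"),
   ("charging", "charging"), ("rechargeable", "charging"), ("usb", "charging")]

def pvMessages : PySem.Dict String String :=
  PySem.Dict.ofList
  [("smart", "Intelligent technology adapts to usage patterns for personalized optimization"),
   ("wireless", "Wireless connectivity eliminates cable constraints while maintaining stable connection"),
   ("charging", "Rapid charging technology minimizes downtime with efficient power management")]

-- the positional scan: 'for j in range(len(attr)+1): for word, category in _WORD_CATEGORY: …'
-- (attr.startswith(word, j) with 0 ≤ j ≤ len(attr) is startswith on List.drop j — exact)
def pvScan (cs : List Char) : PySem.Set String :=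
  (List.range (cs.length + 1)).foldl
    (fun found j =>
      pvWordCategory.foldl
        (fun found wc =>
          if PySem.Chars.startswith (cs.drop j) wc.1.toList then PySem.Set.add found wc.2 else found)
        found)
    PySem.Set.empty

-- 'for category in ("smart", "wireless", "charging"): …' first-match loop
-- (_MESSAGES[category] ported as getD: category is always a key of pvMessages here)
def pvPick (found : PySem.Set String) (used : String) : List String → Option String
  | [] => none
  | c :: rest =>
      if PySem.Set.contains found c && !(PySem.Str.isIn c used) then
        some (PySem.Dict.getD pvMessages c "")
      else pvPick found used rest

def generate_technology_bullet_py_alt (attributes : List (String × String)) (features : List (String × String)) (schema : List (String × String)) (used_keywords : List String) : Option String :=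
  pvPick (pvScan (PySem.Str.lower (pyReprDict attributes)).toList) (pyReprSet used_keywords)
    ["smart", "wireless", "charging"]

-- ===== PRECONDITION & SPEC =====
def Spec_generate_technology_bullet_py (attributes : List (String × String)) (features : List (String × String)) (schema : List (String × String)) (used_keywords : List String) (out : Option String) : Prop := out = generate_technology_bullet_py_alt attributes features schema used_keywords
instance (attributes : List (String × String)) (features : List (String × String)) (schema : List (String × String)) (used_keywords : List String) (out : Option String) : Decidable (Spec_generate_technology_bullet_py attributes features schema used_keywords out) := by unfold Spec_generate_technology_bullet_py; infer_instance

-- ===== CLAIM (what is proved, stated in full; the proofs are below) =====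
def Claim_equal_generate_technology_bullet_py : Prop := ∀ (attributes : List (String × String)) (features : List (String × String)) (schema : List (String × String)) (used_keywords : List String), Dom_generate_technology_bullet_py attributes features schema used_keywords → Spec_generate_technology_bullet_py attributes features schema used_keywords (generate_technology_bullet_py attributes features schema used_keywords)

-- ===== LEMMAS AND PROOFS =====

-- membership after the inner (per-position) pass over the word/category table
lemma mem_inner (pairs : List (String × String)) (found : PySem.Set String) (tail : List Char) (c : String) :
    c ∈ pairs.foldl
      (fun found wc =>
        if PySem.Chars.startswith tail wc.1.toList then PySem.Set.add found wc.2 else found)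
      found ↔
    c ∈ found ∨ ∃ wc ∈ pairs, PySem.Chars.startswith tail wc.1.toList = true ∧ wc.2 = c := by
  induction pairs generalizing found with
  | nil => simp
  | cons p ps ih =>
      simp only [List.foldl_cons, ih]
      by_cases h : PySem.Chars.startswith tail p.1.toList = true
      · simp only [h, if_true, PySem.Set.mem_add]
        constructor
        · rintro (⟨h1 | h1⟩ | h1) <;> [exact Or.inl h1; exact Or.inr ⟨p, by simp, h, h1.symm⟩;
            · rcases h1 with ⟨wc, hwc, hs, hc⟩; exact Or.inr ⟨wc, by simp [hwc], hs, hc⟩]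
        · rintro (h1 | ⟨wc, hwc, hs, hc⟩)
          · exact Or.inl (Or.inl h1)
          · rcases List.mem_cons.mp hwc with rfl | hwc
            · exact Or.inl (Or.inr hc.symm)
            · exact Or.inr ⟨wc, hwc, hs, hc⟩
      · simp only [h, Bool.false_eq_true, if_false]
        constructor
        · rintro (h1 | ⟨wc, hwc, hs, hc⟩)
          · exact Or.inl h1
          · exact Or.inr ⟨wc, by simp [hwc], hs, hc⟩
        · rintro (h1 | ⟨wc, hwc, hs, hc⟩)
          · exact Or.inl h1
          · rcases List.mem_cons.mp hwc with rfl | hwc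
            · exact absurd hs h
            · exact Or.inr ⟨wc, hwc, hs, hc⟩

-- membership after the whole scan
lemma mem_scan (cs : List Char) (c : String) :
    c ∈ pvScan cs ↔
    ∃ wc ∈ pvWordCategory, wc.2 = c ∧ PySem.Chars.isIn wc.1.toList cs = true := by
  have gen : ∀ (l : List Nat) (found : PySem.Set String),
      c ∈ l.foldl
        (fun found j =>
          let tail := cs.drop j
          pvWordCategory.foldl
            (fun found wc =>
              if PySem.Chars.startswith tail wc.1.toList then PySem.Set.add found wc.2 else found)
            found)
        found ↔
      c ∈ found ∨ ∃ j ∈ l, ∃ wc ∈ pvWordCategory,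
        PySem.Chars.startswith (cs.drop j) wc.1.toList = true ∧ wc.2 = c := by
    intro l
    induction l with
    | nil => simp
    | cons j js ih =>
        intro found
        simp only [List.foldl_cons, ih, mem_inner]
        constructor
        · rintro (⟨h | ⟨wc, hwc, hs, hc⟩⟩ | ⟨j', hj', wc, hwc, hs, hc⟩)
          · exact Or.inl h
          · exact Or.inr ⟨j, by simp, wc, hwc, hs, hc⟩
          · exact Or.inr ⟨j', by simp [hj'], wc, hwc, hs, hc⟩
        · rintro (h | ⟨j', hj', wc, hwc, hs, hc⟩)
          · exact Or.inl (Or.inl h)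
          · rcases List.mem_cons.mp hj' with rfl | hj'
            · exact Or.inl (Or.inr ⟨wc, hwc, hs, hc⟩)
            · exact Or.inr ⟨j', hj', wc, hwc, hs, hc⟩
  rw [pvScan, gen]
  simp only [PySem.Set.empty, List.not_mem_nil, false_or, List.mem_range]
  constructor
  · rintro ⟨j, _, wc, hwc, hs, hc⟩
    refine ⟨wc, hwc, hc, ?_⟩
    exact (PySem.Chars.exists_prefix_drop_iff_isIn _ _).mp
      ⟨j, (PySem.Chars.startswith_iff _ _).mp hs⟩
  · rintro ⟨wc, hwc, hc, hin⟩
    obtain ⟨j, hp⟩ := (PySem.Chars.exists_prefix_drop_iff_isIn _ _).mpr hin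
    by_cases hj : j ≤ cs.length
    · exact ⟨j, by omega, wc, hwc, (PySem.Chars.startswith_iff _ _).mpr hp, hc⟩
    · -- past the end: cs.drop j = [] = cs.drop cs.length, reuse position cs.length
      have hnil : cs.drop j = ([] : List Char) := List.drop_eq_nil_of_le (by omega)
      have hp' : wc.1.toList <+: cs.drop cs.length := by
        rw [List.drop_length]
        rw [hnil] at hp
        exact hp
      exact ⟨cs.length, by omega, wc, hwc, (PySem.Chars.startswith_iff _ _).mpr hp', hc⟩

-- the three category flags, as A computes them
lemma contains_scan_smart (cs : List Char) :
    PySem.Set.contains (pvScan cs) "smart" =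
      (PySem.Chars.isIn "smart".toList cs || PySem.Chars.isIn "ai".toList cs ||
       PySem.Chars.isIn "intelligent".toList cs) := by
  rw [Bool.eq_iff_iff]
  simp only [PySem.Set.contains_iff, mem_scan, pvWordCategory, List.mem_cons, List.not_mem_nil]
  constructor
  · rintro ⟨wc, hwc, hc, hin⟩
    rcases hwc with rfl|rfl|rfl|rfl|rfl|rfl|rfl|rfl|h <;> simp_all
  · intro h
    rcases Bool.or_eq_true_iff.mp h with h | h
    · rcases Bool.or_eq_true_iff.mp h with h | h
      · exact ⟨("smart", "smart"), by simp, rfl, h⟩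
      · exact ⟨("ai", "smart"), by simp, rfl, h⟩
    · exact ⟨("intelligent", "smart"), by simp, rfl, h⟩

lemma contains_scan_wireless (cs : List Char) :
    PySem.Set.contains (pvScan cs) "wireless" =
      (PySem.Chars.isIn "wireless".toList cs || PySem.Chars.isIn "bluetooth".toList cs) := by
  rw [Bool.eq_iff_iff]
  simp only [PySem.Set.contains_iff, mem_scan, pvWordCategory, List.mem_cons, List.not_mem_nil]
  constructor
  · rintro ⟨wc, hwc, hc, hin⟩
    rcases hwc with rfl|rfl|rfl|rfl|rfl|rfl|rfl|rfl|h <;> simp_all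
  · intro h
    rcases Bool.or_eq_true_iff.mp h with h | h
    · exact ⟨("wireless", "wireless"), by simp, rfl, h⟩
    · exact ⟨("bluetooth", "wireless"), by simp, rfl, h⟩

lemma contains_scan_charging (cs : List Char) :
    PySem.Set.contains (pvScan cs) "charging" =
      (PySem.Chars.isIn "charging".toList cs || PySem.Chars.isIn "rechargeable".toList cs ||
       PySem.Chars.isIn "usb".toList cs) := by
  rw [Bool.eq_iff_iff]
  simp only [PySem.Set.contains_iff, mem_scan, pvWordCategory, List.mem_cons, List.not_mem_nil]
  constructor
  · rintro ⟨wc, hwc, hc, hin⟩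
    rcases hwc with rfl|rfl|rfl|rfl|rfl|rfl|rfl|rfl|h <;> simp_all
  · intro h
    rcases Bool.or_eq_true_iff.mp h with h | h
    · rcases Bool.or_eq_true_iff.mp h with h | h
      · exact ⟨("charging", "charging"), by simp, rfl, h⟩
      · exact ⟨("rechargeable", "charging"), by simp, rfl, h⟩
    · exact ⟨("usb", "charging"), by simp, rfl, h⟩

-- ===== VERDICT (by name: the statement is the Claim_ definition above) =====
theorem generate_technology_bullet_py_spec : Claim_equal_generate_technology_bullet_py := by
  intro attributes features schema used_keywords _
  unfold Spec_generate_technology_bullet_py generate_technology_bullet_py generate_technology_bullet_py_alt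
  simp only [pvPick, contains_scan_smart, contains_scan_wireless, contains_scan_charging]
  simp [pvMessages, PySem.Dict.getD, PySem.Dict.ofList, Bool.or_assoc]
  split_ifs <;> rfl
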